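-- pv_equiv track=rewrite | github.com/sq-sqdm-2026/front-office | src/simulation/schedule.py | _counts_to_series
-- ===== SOURCE A (Python) =====
-- def _counts_to_series(counts):
--     """Convert {pair: count} into [(teamA, teamB, series_len), ...]."""
--     series = []
--     for (a, b), total in counts.items():
--         r = total
--         while r > 0:
--             if r >= 7:
--                 series.append((a, b, 4)); r -= 4
--             elif r == 6:
--                 series.append((a, b, 3)); series.append((a, b, 3)); r = 0
--             elif r == 4:
--                 series.append((a, b, 4)); r = 0
--             elif r == 3:
--                 series.append((a, b, 3)); r = 0
--             else:
--                 series.append((a, b, r)); r = 0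
--     return series
-- ===== SOURCE B (Python) =====
-- def _counts_to_series(counts):
--     """Convert {pair: count} into [(teamA, teamB, series_len), ...]."""
--     series = []
--     for (a, b), total in counts.items():
--         k = max(0, (total - 3) // 4)
--         rem = total - 4 * k
--         series += [(a, b, 4)] * k
--         if rem == 6:
--             series += [(a, b, 3), (a, b, 3)]
--         elif rem > 0:
--             series.append((a, b, rem))
--     return series
-- ===== Notes on version B (the rewrite author's own statement) =====
-- stated objective: simpler
-- what changed: Replaces the per-pair while loop that peels 4 games at a time with a closed-form computation: k = max(0,(total-3)//4) full series of 4 plus one arithmetic tail (two 3s when the remainder is 6, one series of the remainder otherwise).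
import Mathlib
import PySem

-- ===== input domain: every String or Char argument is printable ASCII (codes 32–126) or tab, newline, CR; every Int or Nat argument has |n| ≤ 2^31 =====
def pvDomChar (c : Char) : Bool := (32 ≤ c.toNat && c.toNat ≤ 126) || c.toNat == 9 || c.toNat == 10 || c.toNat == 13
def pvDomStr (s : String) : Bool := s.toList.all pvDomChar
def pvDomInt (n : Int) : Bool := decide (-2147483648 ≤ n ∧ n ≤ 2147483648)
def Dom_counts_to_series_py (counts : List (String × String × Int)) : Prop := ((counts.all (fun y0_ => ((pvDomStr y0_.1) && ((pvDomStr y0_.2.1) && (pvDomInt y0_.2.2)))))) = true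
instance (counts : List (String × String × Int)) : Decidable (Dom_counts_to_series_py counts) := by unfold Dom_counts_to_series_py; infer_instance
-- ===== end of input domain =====

-- B replaces A's per-pair while loop with a closed-form series count (simpler); proved equal on all inputs.


-- ===== PORT A =====
-- the inner 'while r > 0' loop of A, accumulating onto 'series'
def pvWhileA (a b : String) (r : Int) (acc : List (String × String × Int)) :
    List (String × String × Int) :=
  if r > 0 then
    if r ≥ 7 then pvWhileA a b (r - 4) (acc ++ [(a, b, 4)])
    else if r = 6 then pvWhileA a b 0 (acc ++ [(a, b, 3), (a, b, 3)])
    else if r = 4 then pvWhileA a b 0 (acc ++ [(a, b, 4)])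
    else if r = 3 then pvWhileA a b 0 (acc ++ [(a, b, 3)])
    else pvWhileA a b 0 (acc ++ [(a, b, r)])
  else acc
termination_by r.toNat
decreasing_by all_goals omega

def counts_to_series_py (counts : List (String × String × Int)) : List (String × String × Int) :=
  counts.foldl (fun series t => pvWhileA t.1 t.2.1 t.2.2 series) []

-- ===== PORT B =====
-- B's loop body for one ((a, b), total) entry: the pieces appended for that pair
def pvEmitB (t : String × String × Int) : List (String × String × Int) :=
  let a := t.1
  let b := t.2.1
  let total := t.2.2
  let k := max 0 (PySem.Int.floordiv (total - 3) 4)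
  let rem := total - 4 * k
  List.replicate k.toNat (a, b, 4) ++
    (if rem = 6 then [(a, b, 3), (a, b, 3)]
     else if rem > 0 then [(a, b, rem)]
     else [])

def counts_to_series_py_alt (counts : List (String × String × Int)) : List (String × String × Int) :=
  counts.foldl (fun series t => series ++ pvEmitB t) []

-- ===== PRECONDITION & SPEC =====
def Spec_counts_to_series_py (counts : List (String × String × Int)) (out : List (String × String × Int)) : Prop := out = counts_to_series_py_alt counts
instance (counts : List (String × String × Int)) (out : List (String × String × Int)) : Decidable (Spec_counts_to_series_py counts out) := by unfold Spec_counts_to_series_py; infer_instance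

-- ===== CLAIM (what is proved, stated in full; the proofs are below) =====
def Claim_equal_counts_to_series_py : Prop := ∀ (counts : List (String × String × Int)), Dom_counts_to_series_py counts → Spec_counts_to_series_py counts (counts_to_series_py counts)

-- ===== LEMMAS AND PROOFS =====

-- A's while loop equals B's closed-form emission, for one pair
lemma pvWhileA_zero (a b : String) (acc : List (String × String × Int)) :
    pvWhileA a b 0 acc = acc := by
  rw [pvWhileA]; norm_num

lemma whileA_eq_emitB (a b : String) (r : Int) (acc : List (String × String × Int)) :
    pvWhileA a b r acc = acc ++ pvEmitB (a, b, r) := by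
  induction r, acc using pvWhileA.induct a b with
  | case1 r acc hpos hge ih =>
      rw [pvWhileA]
      simp only [if_pos hpos, if_pos hge, ih]
      have hdiv : PySem.Int.floordiv (r - 3) 4 = (r - 3) / 4 :=
        PySem.Int.floordiv_eq_ediv_of_pos (by norm_num)
      have hdiv' : PySem.Int.floordiv (r - 4 - 3) 4 = (r - 4 - 3) / 4 :=
        PySem.Int.floordiv_eq_ediv_of_pos (by norm_num)
      simp only [pvEmitB, hdiv, hdiv']
      have h1 : max 0 ((r - 3) / 4) = (r - 4 - 3) / 4 + 1 := by omega
      have h4 : r - 4 * ((r - 4 - 3) / 4 + 1) = (r - 4) - 4 * max 0 ((r - 4 - 3) / 4) := by omega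
      have h5 : ((r - 4 - 3) / 4 + 1).toNat = (max 0 ((r - 4 - 3) / 4)).toNat + 1 := by omega
      simp only [h1, h4, h5, List.replicate_succ, List.append_assoc, List.cons_append,
        List.nil_append]
  | case2 acc h1 h2 ih =>
      rw [pvWhileA]; norm_num [pvWhileA_zero]
      rfl
  | case3 acc h1 h2 h3 ih =>
      rw [pvWhileA]; norm_num [pvWhileA_zero]
      rfl
  | case4 acc h1 h2 h3 h4 ih =>
      rw [pvWhileA]; norm_num [pvWhileA_zero]
      rfl
  | case5 r acc hpos hge h6 h4 h3 ih =>
      rw [pvWhileA]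
      simp only [if_pos hpos, if_neg hge, if_neg h6, if_neg h4, if_neg h3, pvWhileA_zero]
      have hdiv : PySem.Int.floordiv (r - 3) 4 = (r - 3) / 4 :=
        PySem.Int.floordiv_eq_ediv_of_pos (by norm_num)
      simp only [pvEmitB, hdiv]
      have hk : max 0 ((r - 3) / 4) = 0 := by omega
      simp [hk, h6, hpos]
  | case6 r acc hpos =>
      rw [pvWhileA]
      simp only [if_neg hpos]
      have hdiv : PySem.Int.floordiv (r - 3) 4 = (r - 3) / 4 :=
        PySem.Int.floordiv_eq_ediv_of_pos (by norm_num)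
      simp only [pvEmitB, hdiv]
      have hk : max 0 ((r - 3) / 4) = 0 := by omega
      have hr6 : ¬ (r = 6) := by omega
      have hrp : ¬ ((0:Int) < r) := by omega
      simp [hk, hr6, hrp]

-- ===== VERDICT (by name: the statement is the Claim_ definition above) =====
theorem counts_to_series_py_spec : Claim_equal_counts_to_series_py := by
  intro counts _
  show counts_to_series_py counts = counts_to_series_py_alt counts
  unfold counts_to_series_py counts_to_series_py_alt
  congr 1
  funext series t
  exact whileA_eq_emitB t.1 t.2.1 t.2.2 series
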